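-- pv_equiv track=rewrite | github.com/alicjastendera/python_codewars | SortedYesNoHow.py | is_sorted_and_how
-- ===== SOURCE A (Python) =====
-- def is_sorted_and_how(arr):
--     is_ascending = False
--     is_descending = False
--
--     for i in range(len(arr)-1):
--         if arr[i] - arr[i+1] < 0:
--             is_ascending = True
--         if arr[i] - arr[i+1] > 0:
--             is_descending = True
--
--     if is_ascending is True and is_descending is False:
--         return "yes, ascending"
--
--     if is_ascending is False and is_descending is True:
--         return "yes, descending"
--
--     return "no"
-- ===== SOURCE B (Python) =====
-- def is_sorted_and_how(arr):
--     if len(set(arr)) <= 1: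
--         return "no"
--     if arr == sorted(arr):
--         return "yes, ascending"
--     if arr == sorted(arr, reverse=True):
--         return "yes, descending"
--     return "no"
-- ===== Notes on version B (the rewrite author's own statement) =====
-- stated objective: simpler
-- what changed: A's single flag-setting index loop over adjacent pairs is replaced by sort-then-compare: B returns 'no' when the list has at most one distinct value, otherwise compares the list with sorted(arr) and sorted(arr, reverse=True).
import Mathlib
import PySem

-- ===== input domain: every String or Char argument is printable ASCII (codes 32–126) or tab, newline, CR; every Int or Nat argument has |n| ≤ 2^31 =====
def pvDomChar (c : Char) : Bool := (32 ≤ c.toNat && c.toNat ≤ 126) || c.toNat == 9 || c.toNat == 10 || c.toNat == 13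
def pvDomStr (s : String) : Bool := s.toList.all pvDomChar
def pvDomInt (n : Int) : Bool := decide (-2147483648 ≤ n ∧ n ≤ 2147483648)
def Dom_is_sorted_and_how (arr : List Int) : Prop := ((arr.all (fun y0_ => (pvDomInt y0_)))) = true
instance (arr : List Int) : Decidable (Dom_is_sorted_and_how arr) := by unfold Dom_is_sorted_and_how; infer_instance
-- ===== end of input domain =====

-- B replaces A's flag-setting index loop by sort-then-compare (arr == sorted(arr), resp. reversed)
-- guarded by a distinctness test len(set(arr)) > 1; objective: simpler/more idiomatic, not faster.

-- ===== PORT A =====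
-- the loop indices i and i+1 are always in range, so pyGetD with default 0 is exact here
def is_sorted_and_how (arr : List Int) : String :=
  let r := (PySem.List.pyRange 0 ((arr.length : Int) - 1) 1).foldl
    (fun (st : Bool × Bool) i =>
      let st1 := if PySem.List.pyGetD arr i 0 - PySem.List.pyGetD arr (i + 1) 0 < 0
                 then (true, st.2) else st
      if PySem.List.pyGetD arr i 0 - PySem.List.pyGetD arr (i + 1) 0 > 0
      then (st1.1, true) else st1)
    (false, false)
  if r.1 = true ∧ r.2 = false then "yes, ascending"
  else if r.1 = false ∧ r.2 = true then "yes, descending"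
  else "no"

-- ===== PORT B =====
def is_sorted_and_how_alt (arr : List Int) : String :=
  if (PySem.Set.ofList arr).length ≤ 1 then "no"
  else if arr = PySem.List.sorted arr (fun x => x) then "yes, ascending"
  else if arr = PySem.List.sorted arr (fun x => x) true then "yes, descending"
  else "no"

-- ===== PRECONDITION & SPEC =====
def Spec_is_sorted_and_how (arr : List Int) (out : String) : Prop := out = is_sorted_and_how_alt arr
instance (arr : List Int) (out : String) : Decidable (Spec_is_sorted_and_how arr out) := by unfold Spec_is_sorted_and_how; infer_instance

-- ===== CLAIM (what is proved, stated in full; the proofs are below) =====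
def Claim_equal_is_sorted_and_how : Prop := ∀ (arr : List Int), Dom_is_sorted_and_how arr → Spec_is_sorted_and_how arr (is_sorted_and_how arr)

-- ===== LEMMAS AND PROOFS =====

/-- is there an adjacent strictly increasing pair -/
def anyInc : List Int → Bool
  | x :: y :: r => decide (x < y) || anyInc (y :: r)
  | _ => false

/-- is there an adjacent strictly decreasing pair -/
def anyDec : List Int → Bool
  | x :: y :: r => decide (y < x) || anyDec (y :: r)
  | _ => false

/-- one step of A's loop body on the adjacent pair (x, y) -/
def stepA (st : Bool × Bool) (x y : Int) : Bool × Bool :=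
  let st1 := if x - y < 0 then (true, st.2) else st
  if x - y > 0 then (st1.1, true) else st1

lemma loop_spec (arr : List Int) (a d : Bool) :
    (List.range (arr.length - 1)).foldl
      (fun st k => stepA st (arr.getD k 0) (arr.getD (k + 1) 0)) (a, d)
    = (a || anyInc arr, d || anyDec arr) := by
  induction arr generalizing a d with
  | nil => simp [anyInc, anyDec]
  | cons x t ih =>
    cases t with
    | nil => simp [anyInc, anyDec]
    | cons y r =>
      have hlen : (x :: y :: r).length - 1 = ((y :: r).length - 1) + 1 := by simp
      rw [hlen, List.range_succ_eq_map, List.foldl_cons, List.foldl_map]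
      have hstep : stepA (a, d) ((x :: y :: r).getD 0 0) ((x :: y :: r).getD 1 0)
          = stepA (a, d) x y := rfl
      rw [hstep]
      have hbody : ∀ (st : Bool × Bool) (k : Nat),
          stepA st ((x :: y :: r).getD (k + 1) 0) ((x :: y :: r).getD (k + 1 + 1) 0)
          = stepA st ((y :: r).getD k 0) ((y :: r).getD (k + 1) 0) := by
        intro st k; rfl
      simp only [hbody]
      rcases hA : stepA (a, d) x y with ⟨a', d'⟩
      rw [ih a' d']
      have hval : stepA (a, d) x y = (a || decide (x < y), d || decide (y < x)) := by
        unfold stepA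
        rcases lt_trichotomy x y with h | h | h
        · simp [h, not_lt.mpr (le_of_lt h), show x - y < 0 by omega]
        · simp [h]
        · simp [show ¬ x < y by omega, h, show ¬ x - y < 0 by omega]
      rw [hval] at hA
      cases hA
      simp [anyInc, anyDec, Bool.or_assoc]

lemma A_eq (arr : List Int) :
    is_sorted_and_how arr =
      if anyInc arr = true ∧ anyDec arr = false then "yes, ascending"
      else if anyInc arr = false ∧ anyDec arr = true then "yes, descending"
      else "no" := by
  unfold is_sorted_and_how
  have hr : (PySem.List.pyRange 0 ((arr.length : Int) - 1) 1).foldl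
      (fun (st : Bool × Bool) i =>
        let st1 := if PySem.List.pyGetD arr i 0 - PySem.List.pyGetD arr (i + 1) 0 < 0
                   then (true, st.2) else st
        if PySem.List.pyGetD arr i 0 - PySem.List.pyGetD arr (i + 1) 0 > 0
        then (st1.1, true) else st1)
      (false, false)
      = (anyInc arr, anyDec arr) := by
    rw [PySem.List.pyRange_one, List.foldl_map]
    have hcast : ((arr.length : Int) - 1 - 0).toNat = arr.length - 1 := by omega
    rw [hcast]
    have hbody : ∀ (st : Bool × Bool) (k : Nat),
        (fun (st : Bool × Bool) (i : Int) =>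
          let st1 := if PySem.List.pyGetD arr i 0 - PySem.List.pyGetD arr (i + 1) 0 < 0
                     then (true, st.2) else st
          if PySem.List.pyGetD arr i 0 - PySem.List.pyGetD arr (i + 1) 0 > 0
          then (st1.1, true) else st1) st (0 + (k : Int))
        = stepA st (arr.getD k 0) (arr.getD (k + 1) 0) := by
      intro st k
      simp only [zero_add]
      have h1 : PySem.List.pyGetD arr (k : Int) 0 = arr.getD k 0 :=
        PySem.List.pyGetD_natCast arr k 0
      have h2 : PySem.List.pyGetD arr ((k : Int) + 1) 0 = arr.getD (k + 1) 0 := by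
        have := PySem.List.pyGetD_natCast arr (k + 1) 0
        rw [← this]; norm_num
      rw [h1, h2]; rfl
    rw [List.foldl_ext _ (fun (st : Bool × Bool) (k : Nat) =>
          stepA st (arr.getD k 0) (arr.getD (k + 1) 0)) (false, false)
        (fun a b _ => hbody a b)]
    exact loop_spec arr false false
  rw [hr]

lemma anyDec_iff_pairwise (arr : List Int) :
    anyDec arr = false ↔ arr.Pairwise (fun a b : Int => a ≤ b) := by
  induction arr with
  | nil => simp [anyDec]
  | cons x t ih =>
    cases t with
    | nil => simp [anyDec]
    | cons y r =>
      rw [List.pairwise_cons]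
      constructor
      · intro h
        simp only [anyDec, Bool.or_eq_false_iff, decide_eq_false_iff_not, not_lt] at h
        obtain ⟨hxy, hrest⟩ := h
        have hp := ih.mp hrest
        refine ⟨?_, hp⟩
        intro a ha
        rcases List.mem_cons.mp ha with rfl | ha
        · exact hxy
        · have := (List.pairwise_cons.mp hp).1 a ha
          omega
      · rintro ⟨hall, hp⟩
        simp only [anyDec, Bool.or_eq_false_iff, decide_eq_false_iff_not, not_lt]
        exact ⟨hall y (by simp), ih.mpr hp⟩

lemma anyInc_iff_pairwise (arr : List Int) :
    anyInc arr = false ↔ arr.Pairwise (fun a b : Int => b ≤ a) := by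
  induction arr with
  | nil => simp [anyInc]
  | cons x t ih =>
    cases t with
    | nil => simp [anyInc]
    | cons y r =>
      rw [List.pairwise_cons]
      constructor
      · intro h
        simp only [anyInc, Bool.or_eq_false_iff, decide_eq_false_iff_not, not_lt] at h
        obtain ⟨hxy, hrest⟩ := h
        have hp := ih.mp hrest
        refine ⟨?_, hp⟩
        intro a ha
        rcases List.mem_cons.mp ha with rfl | ha
        · exact hxy
        · have := (List.pairwise_cons.mp hp).1 a ha
          omega
      · rintro ⟨hall, hp⟩
        simp only [anyInc, Bool.or_eq_false_iff, decide_eq_false_iff_not, not_lt]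
        exact ⟨hall y (by simp), ih.mpr hp⟩

lemma sorted_eq_iff (arr : List Int) :
    (arr = PySem.List.sorted arr (fun x => x)) ↔ anyDec arr = false := by
  rw [anyDec_iff_pairwise]
  constructor
  · intro h
    have := PySem.List.sorted_pairwise arr (fun x : Int => x)
    rw [← h] at this
    exact this
  · intro h
    exact (PySem.List.sorted_eq_self_of_pairwise arr (fun x => x) h).symm

lemma sortedRev_eq_iff (arr : List Int) :
    (arr = PySem.List.sorted arr (fun x => x) true) ↔ anyInc arr = false := by
  rw [anyInc_iff_pairwise]
  constructor
  · intro h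
    have := PySem.List.sorted_pairwise_rev arr (fun x : Int => x)
    rw [← h] at this
    exact this
  · intro h
    exact (PySem.List.sorted_rev_eq_self_of_pairwise arr (fun x => x) h).symm

lemma allEq_iff (arr : List Int) :
    (∀ x ∈ arr, ∀ y ∈ arr, x = y) ↔ (anyInc arr = false ∧ anyDec arr = false) := by
  rw [anyInc_iff_pairwise, anyDec_iff_pairwise]
  constructor
  · intro h
    constructor
    · exact List.pairwise_of_forall_mem_list (fun a ha b hb => le_of_eq (h b hb a ha))
    · exact List.pairwise_of_forall_mem_list (fun a ha b hb => le_of_eq (h a ha b hb))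
  · rintro ⟨h1, h2⟩
    have hpe : arr.Pairwise (fun a b : Int => a = b) := by
      have := h2.and h1
      exact this.imp (fun hab => le_antisymm hab.1 hab.2)
    intro x hx y hy
    by_cases hxy : x = y
    · exact hxy
    · exact hpe.forall (fun a b (h : a = b) => h.symm) hx hy hxy

lemma distinct_le_one_iff (arr : List Int) :
    ((PySem.Set.ofList arr).length ≤ 1) ↔ (anyInc arr = false ∧ anyDec arr = false) := by
  rw [← allEq_iff]
  constructor
  · intro h x hx y hy
    have hx' : x ∈ PySem.Set.ofList arr := (PySem.Set.mem_ofList arr x).mpr hx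
    have hy' : y ∈ PySem.Set.ofList arr := (PySem.Set.mem_ofList arr y).mpr hy
    match hl : PySem.Set.ofList arr with
    | [] => rw [hl] at hx'; simp at hx'
    | [z] => rw [hl] at hx' hy'; simp at hx' hy'; omega
    | a :: b :: t => rw [hl] at h; simp at h
  · intro h
    match hl : PySem.Set.ofList arr with
    | [] => simp
    | [z] => simp
    | a :: b :: t =>
      exfalso
      have hnd : (a :: b :: t).Nodup := hl ▸ PySem.Set.nodup_ofList arr
      have ha : a ∈ arr := (PySem.Set.mem_ofList arr a).mp (hl ▸ (by simp : a ∈ a :: b :: t))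
      have hb : b ∈ arr := (PySem.Set.mem_ofList arr b).mp (hl ▸ (by simp : b ∈ a :: b :: t))
      have : a = b := h a ha b hb
      simp [this] at hnd

-- ===== VERDICT (by name: the statement is the Claim_ definition above) =====
theorem is_sorted_and_how_spec : Claim_equal_is_sorted_and_how := by
  intro arr _
  unfold Spec_is_sorted_and_how is_sorted_and_how_alt
  rw [A_eq arr]
  rcases h1 : anyInc arr <;> rcases h2 : anyDec arr <;>
    simp [distinct_le_one_iff, sorted_eq_iff, sortedRev_eq_iff, h1, h2]
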